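/- GENERATED by farm/mkstatement.py from design/units.tsv (unit `DGifDecreaseImageCounter.1`) and the assertions of Gif/Spec/Seg_DGifDecreaseImageCounter.lean — do not edit.
   THE STATEMENT of the proof unit `DGifDecreaseImageCounter.1`: segment 1 of `DGifDecreaseImageCounter` (22 instructions; entries 0x10a460;
   exits 0x10a4b1; ranges 0x10a460-0x10a4b1)
   takes each of its entry assertions to one of its exit assertions (`Gif.Spec.DGifDecreaseImageCounter.Seg1`), given the contracts of its callees.
   What the names mean: ProgX/Base/Spec/Basic.lean (the shared hypotheses), Gif/Spec/Seg_DGifDecreaseImageCounter.lean (the assertions). The theorem to prove: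
   `theorem DGifDecreaseImageCounter_1_ok : Gif.Spec.DGifDecreaseImageCounter_1.Statement`. -/
import Gif.Code
import Gif.Dec.All
import Gif.Labels
import Gif.Spec.Seg_DGifDecreaseImageCounter
import ProgX.Base.Spec.Heap
namespace Gif.Spec.DGifDecreaseImageCounter_1
open X86 X86.User Asan

/-- The statement of unit `DGifDecreaseImageCounter.1`. -/
def Statement : Prop :=
  ∀ (Lay : Layout) (_hLay : Lay.hi = 0x1000000) (μ : Microarch) (_hμ : UserX.MicroOK μ) (u₀ : State)
    (_hcode : HasCodeNat Lay u₀ Gif.L.DGifDecreaseImageCounter.entry Gif.Code.code_DGifDecreaseImageCounter.nat Gif.L.DGifDecreaseImageCounter.size)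
    (_h_free : ∀ (H : Heap) (rest : List Obj) (frames : List (Nat × FrameLayout)) (n : Nat), Calls Lay μ ProgX.Base.WayInv (ProgX.Base.conv u₀) ProgX.Base.L.free.entry (ProgX.Base.Spec.free.spec H rest frames n))
    (_h_asan_load4_noabort : Asan.SmallCheck Lay μ ProgX.Base.WayInv (ProgX.Base.CodeOK u₀) [.rax, .rcx, .rdx] 4 ProgX.Base.L.__asan_load4_noabort.entry)
    (_h_asan_load8_noabort : Asan.SmallCheck Lay μ ProgX.Base.WayInv (ProgX.Base.CodeOK u₀) [.rax, .rcx, .rdx] 8 ProgX.Base.L.__asan_load8_noabort.entry),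
    Gif.Spec.DGifDecreaseImageCounter.Seg1 Lay μ u₀

end Gif.Spec.DGifDecreaseImageCounter_1
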